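-- pv_equiv track=rewrite | github.com/the-loki/rider-godot-doc-generator | main.py | extract_common_indentation
-- ===== SOURCE A (Python) =====
-- import textwrap
--
-- def extract_common_indentation(text):
--     """
--     Extract the common indentation from a multi-line text.
--
--     Args:
--         text: Multi-line text string
--
--     Returns:
--         String containing the common indentation (spaces or tabs)
--     """
--     non_empty_lines = [line for line in text.splitlines() if line.strip()]
--     if not non_empty_lines:
--         return ''
--
--     # Get the first non-empty line with original indentation
--     first_line_with_indent = non_empty_lines[0]
--
--     # Get the same line after removing common indentation
--     dedented_text = textwrap.dedent(text)
--     first_line_dedented = next(line for line in dedented_text.splitlines() if line.strip())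
--
--     # The difference is the common indentation
--     indent_length = len(first_line_with_indent) - len(first_line_dedented)
--     common_indent = first_line_with_indent[:indent_length]
--
--     return common_indent
-- ===== SOURCE B (Python) =====
-- def extract_common_indentation(text):
--     """
--     Extract the common indentation from a multi-line text.
--
--     Args:
--         text: Multi-line text string
--
--     Returns:
--         String containing the common indentation (spaces or tabs)
--     """
--     indents = []
--     for line in text.splitlines():
--         if line.strip():
--             i = 0
--             while i < len(line) and line[i] in ' \t':
--                 i += 1
--             indents.append(line[:i])
--     if not indents:
--         return ''
--     margin = indents[0]
--     for ind in indents[1:]: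
--         j = 0
--         while j < len(margin) and j < len(ind) and margin[j] == ind[j]:
--             j += 1
--         margin = margin[:j]
--     return margin
-- ===== Notes on version B (the rewrite author's own statement) =====
-- stated objective: simpler
-- what changed: B computes the common indentation directly by one pass over the non-blank splitlines() lines, shrinking a running margin to the longest common prefix of their leading space/tab runs, instead of calling textwrap.dedent on the whole text and measuring the length difference of the first non-blank line before and after.
-- outside the precondition, e.g. on extract_common_indentation('  \r  a'): A returns '', B returns '  '; on extract_common_indentation('    a\n  \r\n'): A returns '  ', B returns '    '
import Mathlib
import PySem

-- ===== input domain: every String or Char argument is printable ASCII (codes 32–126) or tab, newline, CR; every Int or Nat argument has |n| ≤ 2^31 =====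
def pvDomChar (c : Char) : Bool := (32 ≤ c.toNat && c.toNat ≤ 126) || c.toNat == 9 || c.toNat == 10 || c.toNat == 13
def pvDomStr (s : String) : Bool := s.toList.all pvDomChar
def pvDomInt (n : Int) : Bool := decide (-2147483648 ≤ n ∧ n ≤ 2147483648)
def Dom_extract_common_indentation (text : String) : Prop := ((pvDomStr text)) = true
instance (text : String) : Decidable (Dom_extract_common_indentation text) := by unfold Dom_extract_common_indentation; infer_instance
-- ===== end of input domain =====

-- B replaces A's textwrap.dedent-and-measure detour by a direct one-pass longest-common-prefix of
-- the leading space/tab runs of the non-blank lines (objective: simpler, no dedented copy of the text).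

-- ===== PORT A =====

def pvWs (c : Char) : Bool := c == ' ' || c == '\t'

-- hand port of text.split('\n') (str.split with the one-character separator '\n'); exact
def pvSplitNl : List Char → List (List Char)
  | [] => [[]]
  | c :: rest =>
    let r := pvSplitNl rest
    if c = '\n' then [] :: r else (c :: r.headD []) :: r.tail

-- textwrap._whitespace_only_re.sub('', …) on one '\n'-delimited line: '^[ \t]+$' matches exactly
-- the non-empty all-space/tab lines ('\r' is not in [ \t], so such a line is left alone); exact
def pvBlankSub (l : List Char) : List Char := if l ≠ [] ∧ l.all pvWs then [] else l

-- textwrap._leading_whitespace_re on one '\n'-delimited line: the group '(^[ \t]*)(?:[^ \t\n])'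
-- captures the leading space/tab run iff some character of the line is outside [ \t]
-- (the line contains no '\n', so [^ \t\n] is [^ \t] there); exact
def pvIndentOf? (l : List Char) : Option (List Char) :=
  if l.any (fun c => !(pvWs c)) then some (l.takeWhile pvWs) else none

-- dedent's inner 'for i, (x, y) in enumerate(zip(margin, indent)): if x != y: margin = margin[:i]; break'
def pvShrink : List Char → List Char → List Char
  | x :: xs, y :: ys => if x == y then x :: pvShrink xs ys else []
  | m, _ => m

-- one iteration of dedent's 'for indent in indents' margin loop
def pvMarginStep (margin? : Option (List Char)) (indent : List Char) : Option (List Char) :=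
  match margin? with
  | none => some indent
  | some m =>
    if m.isPrefixOf indent then some m
    else if indent.isPrefixOf m then some indent
    else some (pvShrink m indent)

-- hand port of textwrap.dedent: the two MULTILINE regex passes and the final "re.sub(r'(?m)^' + margin"
-- act per '\n'-line, so they are ported on text.split('\n') and the lines are re-joined; exact
def pvDedent (cs : List Char) : List Char :=
  let lines := (pvSplitNl cs).map pvBlankSub
  let margin? := (lines.filterMap pvIndentOf?).foldl pvMarginStep none
  let margin := margin?.getD []
  let lines2 := if margin = [] then lines
    else lines.map (fun l => if margin.isPrefixOf l then l.drop margin.length else l)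
  PySem.Chars.join ['\n'] lines2

def extract_common_indentation (text : String) : String :=
  let non_empty := (PySem.Chars.splitlines text.toList).filter (fun l => PySem.Chars.strip l ≠ [])
  if non_empty = [] then "" else
    let first := non_empty.headD []
    let ded := pvDedent text.toList
    let firstDed := ((PySem.Chars.splitlines ded).filter (fun l => PySem.Chars.strip l ≠ [])).headD []
    let indentLen : Int := (first.length : Int) - (firstDed.length : Int)
    String.ofList (PySem.List.slice first none (some indentLen))

-- ===== PORT B =====

-- B's inner while loop: character-by-character longest common prefix
def pvLcp : List Char → List Char → List Char
  | x :: xs, y :: ys => if x == y then x :: pvLcp xs ys else []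
  | _, _ => []

def extract_common_indentation_alt (text : String) : String :=
  let indents := (PySem.Chars.splitlines text.toList).foldl
    (fun acc line => if PySem.Chars.strip line ≠ [] then acc ++ [line.takeWhile pvWs] else acc) []
  match indents with
  | [] => ""
  | i :: rest => String.ofList (rest.foldl pvLcp i)

-- ===== PRECONDITION & SPEC =====

-- Pre_ excludes texts containing a carriage-return character (inputs on which A still returns a
-- value): there str.splitlines line boundaries and textwrap.dedent's newline-based splitting
-- disagree, so A can return a string that is not the common indentation of any visible line — a
-- corner no caller specifies; B returns the common indentation of the splitlines() lines there.
def Pre_extract_common_indentation (text : String) : Prop := '\r' ∉ text.toList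
instance (text : String) : Decidable (Pre_extract_common_indentation text) := by
  unfold Pre_extract_common_indentation; infer_instance

def pvWitness_extract_common_indentation : String := "  a\n    b\n"

def Spec_extract_common_indentation (text : String) (out : String) : Prop := out = extract_common_indentation_alt text
instance (text : String) (out : String) : Decidable (Spec_extract_common_indentation text out) := by unfold Spec_extract_common_indentation; infer_instance

-- ===== CLAIM (what is proved, stated in full; the proofs are below) =====
def Claim_equal_extract_common_indentation : Prop := ∀ (text : String), Dom_extract_common_indentation text → Pre_extract_common_indentation text → Spec_extract_common_indentation text (extract_common_indentation text)

-- ===== LEMMAS AND PROOFS =====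

theorem pv_isspace_eq (c : Char) (hd : pvDomChar c = true) (hr : c ≠ '\r') (hn : c ≠ '\n') :
    PySem.Chars.isspace c = pvWs c := by
  have h13 : c.toNat ≠ 13 := fun h => hr (Char.ext (UInt32.toNat_inj.mp h))
  have h10 : c.toNat ≠ 10 := fun h => hn (Char.ext (UInt32.toNat_inj.mp h))
  have e32 : (c = ' ') ↔ c.toNat = 32 :=
    ⟨fun h => by subst h; decide, fun h => Char.ext (UInt32.toNat_inj.mp h)⟩
  have e9 : (c = '\t') ↔ c.toNat = 9 :=
    ⟨fun h => by subst h; decide, fun h => Char.ext (UInt32.toNat_inj.mp h)⟩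
  simp only [pvDomChar, Bool.or_eq_true, Bool.and_eq_true, decide_eq_true_eq, beq_iff_eq] at hd
  apply Bool.eq_iff_iff.mpr
  simp only [PySem.Chars.isspace, pvWs, Bool.or_eq_true, Bool.and_eq_true, decide_eq_true_eq,
    beq_iff_eq, e32, e9]
  omega

theorem pv_strip_nil_iff (l : List Char) :
    PySem.Chars.strip l = [] ↔ l.all PySem.Chars.isspace = true := by
  simp only [PySem.Chars.strip, PySem.Chars.rstrip, PySem.Chars.lstrip,
    List.reverse_eq_nil_iff, List.dropWhile_eq_nil_iff, List.mem_reverse, List.all_eq_true]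
  constructor
  · intro h x hx
    rw [← List.takeWhile_append_dropWhile (p := PySem.Chars.isspace) (l := l)] at hx
    rcases List.mem_append.mp hx with h1 | h2
    · exact List.mem_takeWhile_imp h1
    · exact h x h2
  · intro h x hx
    exact h x ((List.dropWhile_sublist _).mem hx)

def pvNB (l : List Char) : Bool := PySem.Chars.strip l ≠ []
def pvLineOk (l : List Char) : Prop := ∀ c ∈ l, pvDomChar c = true ∧ c ≠ '\r' ∧ c ≠ '\n'
def pvTextOk (s : List Char) : Prop := ∀ c ∈ s, pvDomChar c = true ∧ c ≠ '\r'

theorem pv_NB_iff (l : List Char) (h : pvLineOk l) :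
    pvNB l = l.any (fun c => !(pvWs c)) := by
  apply Bool.eq_iff_iff.mpr
  simp only [pvNB, decide_eq_true_eq, ne_eq, pv_strip_nil_iff, List.all_eq_true,
    List.any_eq_true, Bool.not_eq_eq_eq_not, Bool.not_true, not_forall]
  constructor
  · rintro ⟨x, hm, hx⟩
    refine ⟨x, hm, ?_⟩
    obtain ⟨hd, hr, hn⟩ := h x hm
    rw [pv_isspace_eq x hd hr hn] at hx
    simpa using hx
  · rintro ⟨x, hm, hws⟩
    obtain ⟨hd, hr, hn⟩ := h x hm
    exact ⟨x, hm, by rw [pv_isspace_eq x hd hr hn]; simpa using hws⟩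

theorem pvSplitNl_ne_nil (s : List Char) : pvSplitNl s ≠ [] := by
  cases s with
  | nil => simp [pvSplitNl]
  | cons c rest => simp only [pvSplitNl]; split <;> simp

theorem pv_cons_headD {α : Type} {ls : List (List α)} (h : ls ≠ []) :
    ls.headD [] :: ls.tail = ls := by
  cases ls with
  | nil => exact absurd rfl h
  | cons a t => rfl

theorem pv_mem_pvSplitNl {s l : List Char} {c : Char}
    (hl : l ∈ pvSplitNl s) (hc : c ∈ l) : c ∈ s ∧ c ≠ '\n' := by
  induction s generalizing l with
  | nil =>
    simp [pvSplitNl] at hl; subst hl; simp at hc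
  | cons d rest ih =>
    simp only [pvSplitNl] at hl
    by_cases hd : d = '\n'
    · simp only [if_pos hd, List.mem_cons] at hl
      rcases hl with h | h
      · subst h; simp at hc
      · have := ih h hc
        exact ⟨List.mem_cons_of_mem d this.1, this.2⟩
    · simp only [if_neg hd, List.mem_cons] at hl
      rcases hl with h | h
      · subst h
        rcases List.mem_cons.mp hc with h1 | h1
        · subst h1; exact ⟨List.mem_cons_self, hd⟩
        · have hhead : (pvSplitNl rest).headD [] ∈ pvSplitNl rest := by
            rw [← pv_cons_headD (pvSplitNl_ne_nil rest)]; exact List.mem_cons_self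
          have := ih hhead h1
          exact ⟨List.mem_cons_of_mem d this.1, this.2⟩
      · have hmem : l ∈ pvSplitNl rest := (List.tail_sublist _).mem h
        have := ih hmem hc
        exact ⟨List.mem_cons_of_mem d this.1, this.2⟩

def pvDte (ls : List (List Char)) : List (List Char) :=
  if ls.getLast? = some ([] : List Char) then ls.dropLast else ls

theorem pvDte_cons (a : List Char) (t : List (List Char)) (h : t ≠ []) :
    pvDte (a :: t) = a :: pvDte t := by
  unfold pvDte
  cases t with
  | nil => exact absurd rfl h
  | cons b t' =>
    rw [List.getLast?_cons_cons, List.dropLast_cons₂]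
    split <;> rfl

theorem pv_filter_dte (ls : List (List Char)) :
    (pvDte ls).filter pvNB = ls.filter pvNB := by
  unfold pvDte
  split
  · rename_i h
    conv_rhs => rw [← List.dropLast_append_getLast? (l := ls) [] h]
    rw [List.filter_append]
    simp [pvNB, PySem.Chars.strip, PySem.Chars.rstrip, PySem.Chars.lstrip]
  · rfl

def pvF (cur : List Char) : List Char → List (List Char)
  | [] => if cur = [] then [] else [cur.reverse]
  | c :: rest => if c = '\n' then cur.reverse :: pvF [] rest else pvF (c :: cur) rest

theorem pv_go_eq (isB : Char → Bool) (s cur : List Char) (acc : List (List Char))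
    (hs : pvTextOk s) (hisB : ∀ c, pvDomChar c = true → c ≠ '\r' → (isB c = true ↔ c = '\n')) :
    PySem.Chars.splitlines.go isB s cur acc = acc.reverse ++ pvF cur s := by
  induction s generalizing cur acc with
  | nil =>
    rw [PySem.Chars.splitlines.go.eq_def]
    simp only [pvF]
    by_cases h : cur = [] <;> simp [h, List.isEmpty_iff]
  | cons c rest ih =>
    have hc := hs c List.mem_cons_self
    have hrest : pvTextOk rest := fun x hx => hs x (List.mem_cons_of_mem c hx)
    rw [PySem.Chars.splitlines.go.eq_def]
    have hne : c ≠ '\r' := hc.2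
    split
    case h_1 =>
      rename_i heq2
      simp at heq2
    case h_2 =>
      rename_i heq2
      injection heq2 with h1 h2
      exact absurd h1 hne
    case h_3 =>
      rename_i heq2
      cases heq2
      by_cases hcn : c = '\n'
      · rw [if_pos ((hisB c hc.1 hc.2).mpr hcn), ih [] _ hrest]
        simp [pvF, hcn, List.append_assoc]
      · rw [if_neg (fun h => hcn ((hisB c hc.1 hc.2).mp h)), ih _ _ hrest]
        simp [pvF, hcn]

theorem pv_pvF_eq (s cur : List Char) :
    pvF cur s = pvDte ((cur.reverse ++ (pvSplitNl s).headD []) :: (pvSplitNl s).tail) := by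
  induction s generalizing cur with
  | nil =>
    simp only [pvF, pvSplitNl, List.headD, List.tail, pvDte, List.append_nil]
    by_cases h : cur = []
    · simp [h]
    · have : cur.reverse ≠ [] := by simpa using h
      simp [h, this]
  | cons c rest ih =>
    simp only [pvF, pvSplitNl]
    by_cases hc : c = '\n'
    · rw [if_pos hc, if_pos hc, ih []]
      obtain ⟨h0, t0, he⟩ : ∃ h0 t0, pvSplitNl rest = h0 :: t0 := by
        rcases hh : pvSplitNl rest with _ | ⟨a, b⟩
        · exact absurd hh (pvSplitNl_ne_nil rest)
        · exact ⟨a, b, rfl⟩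
      rw [he]
      simp only [List.headD_cons, List.tail_cons, List.reverse_nil, List.nil_append,
        List.append_nil]
      rw [pvDte_cons _ _ (List.cons_ne_nil h0 t0)]
    · rw [if_neg hc, if_neg hc, ih (c :: cur)]
      simp [List.append_assoc]

theorem pv_splitlines_filter (s : List Char) (hs : pvTextOk s) :
    (PySem.Chars.splitlines s).filter pvNB = (pvSplitNl s).filter pvNB := by
  have hisB : ∀ c : Char, pvDomChar c = true → c ≠ '\r' →
      (((fun c : Char =>
        have n := c.toNat
        decide (n = 10) || decide (n = 13) || decide (n = 11) || decide (n = 12) ||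
          decide (n = 28) || decide (n = 29) || decide (n = 30) || decide (n = 133) ||
          decide (n = 8232) || decide (n = 8233)) c) = true ↔ c = '\n') := by
    intro c hd hr
    have h13 : c.toNat ≠ 13 := fun h => hr (Char.ext (UInt32.toNat_inj.mp h))
    have e10 : (c = '\n') ↔ c.toNat = 10 :=
      ⟨fun h => by subst h; decide, fun h => Char.ext (UInt32.toNat_inj.mp h)⟩
    simp only [pvDomChar, Bool.or_eq_true, Bool.and_eq_true, decide_eq_true_eq, beq_iff_eq] at hd
    simp only [Bool.or_eq_true, decide_eq_true_eq, e10]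
    omega
  rw [show PySem.Chars.splitlines s = PySem.Chars.splitlines.go _ s [] [] from rfl,
    pv_go_eq _ s [] [] hs hisB]
  rw [List.reverse_nil, List.nil_append, pv_pvF_eq]
  simp only [List.reverse_nil, List.nil_append]
  rw [pv_cons_headD (pvSplitNl_ne_nil s)]
  exact pv_filter_dte _


theorem pvSplitNl_append_noNl (l t : List Char) (h : '\n' ∉ l) :
    pvSplitNl (l ++ t) = (l ++ (pvSplitNl t).headD []) :: (pvSplitNl t).tail := by
  induction l with
  | nil =>
    simp only [List.nil_append]
    exact (pv_cons_headD (pvSplitNl_ne_nil t)).symm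
  | cons c l' ih =>
    have hc : c ≠ '\n' := fun he => h (he ▸ List.mem_cons_self)
    have h' : '\n' ∉ l' := fun hm => h (List.mem_cons_of_mem c hm)
    simp only [List.cons_append, pvSplitNl, if_neg hc, ih h', List.headD_cons, List.tail_cons]

theorem pvSplitNl_join (ls : List (List Char)) (h0 : ls ≠ []) (h : ∀ l ∈ ls, '\n' ∉ l) :
    pvSplitNl (PySem.Chars.join ['\n'] ls) = ls := by
  induction ls with
  | nil => exact absurd rfl h0
  | cons a t ih =>
    cases t with
    | nil =>
      show pvSplitNl (List.intercalate ['\n'] [a]) = [a]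
      rw [show List.intercalate ['\n'] [a] = a ++ [] by simp [List.intercalate]]
      rw [pvSplitNl_append_noNl a [] (h a List.mem_cons_self)]
      simp [pvSplitNl]
    | cons b t' =>
      show pvSplitNl (List.intercalate ['\n'] (a :: b :: t')) = a :: b :: t'
      rw [show List.intercalate ['\n'] (a :: b :: t')
            = a ++ ('\n' :: List.intercalate ['\n'] (b :: t')) by
          simp [List.intercalate, List.intersperse]]
      rw [pvSplitNl_append_noNl a _ (h a List.mem_cons_self)]
      have hrec : pvSplitNl (List.intercalate ['\n'] (b :: t')) = b :: t' :=
        ih (List.cons_ne_nil b t') (fun l hl => h l (List.mem_cons_of_mem a hl))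
      rw [show pvSplitNl ('\n' :: List.intercalate ['\n'] (b :: t'))
            = [] :: pvSplitNl (List.intercalate ['\n'] (b :: t')) by simp [pvSplitNl]]
      rw [hrec]
      simp

theorem pv_mem_join {c : Char} (ls : List (List Char))
    (hc : c ∈ PySem.Chars.join ['\n'] ls) : c = '\n' ∨ ∃ l ∈ ls, c ∈ l := by
  induction ls with
  | nil => simp [PySem.Chars.join, List.intercalate] at hc
  | cons a t ih =>
    cases t with
    | nil =>
      rw [show PySem.Chars.join ['\n'] [a] = a by simp [PySem.Chars.join, List.intercalate]] at hc
      exact Or.inr ⟨a, List.mem_cons_self, hc⟩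
    | cons b t' =>
      rw [show PySem.Chars.join ['\n'] (a :: b :: t')
            = a ++ ('\n' :: PySem.Chars.join ['\n'] (b :: t')) by
          simp [PySem.Chars.join, List.intercalate, List.intersperse]] at hc
      rcases List.mem_append.mp hc with h1 | h1
      · exact Or.inr ⟨a, List.mem_cons_self, h1⟩
      · rcases List.mem_cons.mp h1 with h2 | h2
        · exact Or.inl h2
        · rcases ih h2 with h3 | ⟨l, hl, hcl⟩
          · exact Or.inl h3
          · exact Or.inr ⟨l, List.mem_cons_of_mem a hl, hcl⟩

theorem pvLcp_cons (x y : Char) (xs ys : List Char) :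
    pvLcp (x :: xs) (y :: ys) = if (x == y) = true then x :: pvLcp xs ys else [] := rfl

theorem pvLcp_prefix_left (a b : List Char) : pvLcp a b <+: a := by
  induction a generalizing b with
  | nil => cases b <;> simp [pvLcp]
  | cons x xs ih =>
    cases b with
    | nil => simp [pvLcp]
    | cons y ys =>
      rw [pvLcp_cons]
      by_cases h : x = y
      · rw [if_pos (by simp [h])]
        exact (List.prefix_cons_inj x).mpr (ih ys)
      · simp [h]

theorem pvLcp_prefix_right (a b : List Char) : pvLcp a b <+: b := by
  induction a generalizing b with
  | nil => cases b <;> simp [pvLcp]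
  | cons x xs ih =>
    cases b with
    | nil => simp [pvLcp]
    | cons y ys =>
      rw [pvLcp_cons]
      by_cases h : x = y
      · rw [if_pos (by simp [h]), h]
        exact (List.prefix_cons_inj y).mpr (ih ys)
      · simp [h]

theorem pvLcp_of_prefix_left (a b : List Char) (h : a <+: b) : pvLcp a b = a := by
  induction a generalizing b with
  | nil => cases b <;> simp [pvLcp]
  | cons x xs ih =>
    cases b with
    | nil => simp at h
    | cons y ys =>
      obtain ⟨hxy, h2⟩ : x = y ∧ xs <+: ys := by
        rcases h with ⟨t, ht⟩
        injection ht with e1 e2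
        exact ⟨e1, ⟨t, e2⟩⟩
      rw [pvLcp_cons, if_pos (by simp [hxy]), ih ys h2]

theorem pvLcp_of_prefix_right (a b : List Char) (h : b <+: a) : pvLcp a b = b := by
  induction a generalizing b with
  | nil =>
    have := List.prefix_nil.mp h
    simp [this, pvLcp]
  | cons x xs ih =>
    cases b with
    | nil => simp [pvLcp]
    | cons y ys =>
      obtain ⟨hxy, h2⟩ : y = x ∧ ys <+: xs := by
        rcases h with ⟨t, ht⟩
        injection ht with e1 e2
        exact ⟨e1, ⟨t, e2⟩⟩
      rw [pvLcp_cons, if_pos (by simp [hxy]), hxy, ih ys h2]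

theorem pvShrink_eq (a b : List Char) (h : ¬ b <+: a) : pvShrink a b = pvLcp a b := by
  induction a generalizing b with
  | nil => cases b <;> rfl
  | cons x xs ih =>
    cases b with
    | nil => exact absurd List.nil_prefix h
    | cons y ys =>
      rw [pvLcp_cons, show pvShrink (x :: xs) (y :: ys)
            = if (x == y) = true then x :: pvShrink xs ys else [] from rfl]
      by_cases hxy : x = y
      · rw [if_pos (by simp [hxy]), if_pos (by simp [hxy])]
        rw [ih ys (fun hp => h (by rw [hxy]; exact (List.prefix_cons_inj y).mpr hp))]
      · rw [if_neg (by simp [hxy]), if_neg (by simp [hxy])]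

theorem pv_step_eq (m ind : List Char) : pvMarginStep (some m) ind = some (pvLcp m ind) := by
  simp only [pvMarginStep]
  by_cases h1 : m <+: ind
  · rw [if_pos (List.isPrefixOf_iff_prefix.mpr h1), pvLcp_of_prefix_left m ind h1]
  · rw [if_neg (fun hc => h1 (List.isPrefixOf_iff_prefix.mp hc))]
    by_cases h2 : ind <+: m
    · rw [if_pos (List.isPrefixOf_iff_prefix.mpr h2), pvLcp_of_prefix_right m ind h2]
    · rw [if_neg (fun hc => h2 (List.isPrefixOf_iff_prefix.mp hc)), pvShrink_eq m ind h2]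

theorem pv_foldl_some (r : List (List Char)) (i : List Char) :
    r.foldl pvMarginStep (some i) = some (r.foldl pvLcp i) := by
  induction r generalizing i with
  | nil => rfl
  | cons a r' ih => rw [List.foldl_cons, pv_step_eq, List.foldl_cons, ih]

theorem pv_foldl_lcp_prefix (r : List (List Char)) :
    ∀ (i : List Char), ∀ x ∈ i :: r, r.foldl pvLcp i <+: x := by
  induction r with
  | nil =>
    intro i x hx
    rcases List.mem_cons.mp hx with rfl | h
    · exact List.prefix_refl _
    · simp at h
  | cons a r' ih =>
    intro i x hx
    rw [List.foldl_cons]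
    rcases List.mem_cons.mp hx with rfl | h
    · exact (ih (pvLcp x a) (pvLcp x a) List.mem_cons_self).trans (pvLcp_prefix_left x a)
    · rcases List.mem_cons.mp h with rfl | h2
      · exact (ih (pvLcp i x) (pvLcp i x) List.mem_cons_self).trans (pvLcp_prefix_right i x)
      · exact ih (pvLcp i a) x (List.mem_cons_of_mem _ h2)

theorem pv_blankSub_of_NB (l : List Char) (h : pvLineOk l) (hnb : pvNB l = true) :
    pvBlankSub l = l := by
  rw [pv_NB_iff l h] at hnb
  unfold pvBlankSub
  rw [if_neg]
  rintro ⟨-, hall⟩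
  rcases List.any_eq_true.mp hnb with ⟨x, hx, hxw⟩
  have := List.all_eq_true.mp hall x hx
  simp [this] at hxw

theorem pv_blankSub_of_not_NB (l : List Char) (h : pvLineOk l) (hnb : pvNB l = false) :
    pvBlankSub l = [] := by
  rw [pv_NB_iff l h] at hnb
  have hall : l.all pvWs = true := by
    rw [List.all_eq_true]
    intro x hx
    by_contra hxw
    have : l.any (fun c => !(pvWs c)) = true :=
      List.any_eq_true.mpr ⟨x, hx, by simpa using hxw⟩
    simp [this] at hnb
  cases l with
  | nil => rfl
  | cons c t => exact if_pos ⟨List.cons_ne_nil c t, hall⟩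

theorem pv_indents_eq (L : List (List Char)) (h : ∀ l ∈ L, pvLineOk l) :
    (L.map pvBlankSub).filterMap pvIndentOf?
      = (L.filter pvNB).map (fun l => l.takeWhile pvWs) := by
  induction L with
  | nil => rfl
  | cons l L' ih =>
    have hl := h l List.mem_cons_self
    have h' : ∀ x ∈ L', pvLineOk x := fun x hx => h x (List.mem_cons_of_mem l hx)
    simp only [List.map_cons, List.filterMap_cons, List.filter_cons]
    cases hnb : pvNB l with
    | true =>
      rw [pv_blankSub_of_NB l hl hnb,
        show pvIndentOf? l = some (l.takeWhile pvWs) by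
          unfold pvIndentOf?
          rw [if_pos (by rw [← pv_NB_iff l hl]; exact hnb)]]
      simp [ih h']
    | false =>
      rw [pv_blankSub_of_not_NB l hl hnb,
        show pvIndentOf? ([] : List Char) = none by rfl]
      simp [ih h']

theorem pv_blankSub_filter (L : List (List Char)) (h : ∀ l ∈ L, pvLineOk l) :
    (L.map pvBlankSub).filter pvNB = L.filter pvNB := by
  induction L with
  | nil => rfl
  | cons l L' ih =>
    have hl := h l List.mem_cons_self
    have h' : ∀ x ∈ L', pvLineOk x := fun x hx => h x (List.mem_cons_of_mem l hx)
    simp only [List.map_cons, List.filter_cons]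
    cases hnb : pvNB l with
    | true => rw [pv_blankSub_of_NB l hl hnb, hnb]; simp [ih h']
    | false =>
      rw [pv_blankSub_of_not_NB l hl hnb]
      simp only [show pvNB ([] : List Char) = false by decide]
      simp [ih h']

theorem pv_NB_drop (l m : List Char) (hok : pvLineOk l) (hnb : pvNB l = true)
    (hmws : ∀ c ∈ m, pvWs c = true) (hpref : m <+: l) :
    pvNB (l.drop m.length) = true := by
  obtain ⟨t, rfl⟩ := hpref
  rw [List.drop_left]
  have hok' : pvLineOk t := fun c hc => hok c (List.mem_append_right m hc)
  rw [pv_NB_iff _ hok']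
  rw [pv_NB_iff _ hok] at hnb
  rcases List.any_eq_true.mp hnb with ⟨x, hx, hxw⟩
  rcases List.mem_append.mp hx with h1 | h1
  · rw [hmws x h1] at hxw; simp at hxw
  · exact List.any_eq_true.mpr ⟨x, h1, hxw⟩

theorem pv_rm_filter (L : List (List Char)) (m : List Char) (hm : m ≠ [])
    (h : ∀ l ∈ L, pvLineOk l)
    (hmws : ∀ c ∈ m, pvWs c = true)
    (hpref : ∀ l ∈ L.filter pvNB, m <+: l.takeWhile pvWs) :
    ((L.map pvBlankSub).map (fun l => if m.isPrefixOf l then l.drop m.length else l)).filter pvNB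
      = (L.filter pvNB).map (fun l => l.drop m.length) := by
  induction L with
  | nil => rfl
  | cons l L' ih =>
    have hl := h l List.mem_cons_self
    have h' : ∀ x ∈ L', pvLineOk x := fun x hx => h x (List.mem_cons_of_mem l hx)
    have hpref' : ∀ x ∈ L'.filter pvNB, m <+: x.takeWhile pvWs := fun x hx =>
      hpref x (by rw [List.filter_cons]; split <;> simp [hx])
    simp only [List.map_cons, List.filter_cons]
    cases hnb : pvNB l with
    | true =>
      have hpl : m <+: l.takeWhile pvWs := hpref l (by rw [List.filter_cons, hnb]; simp)
      have hpl2 : m <+: l := hpl.trans (List.takeWhile_prefix _)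
      rw [pv_blankSub_of_NB l hl hnb, if_pos (List.isPrefixOf_iff_prefix.mpr hpl2)]
      rw [show pvNB (l.drop m.length) = true from pv_NB_drop l m hl hnb hmws hpl2]
      rw [if_pos rfl, if_pos rfl, List.map_cons]
      exact congrArg (List.cons _) (ih h' hpref')
    | false =>
      rw [pv_blankSub_of_not_NB l hl hnb,
        if_neg (fun hc => hm (List.prefix_nil.mp (List.isPrefixOf_iff_prefix.mp hc)))]
      simp only [show pvNB ([] : List Char) = false by decide]
      rw [if_neg (by simp), if_neg (by simp)]
      exact ih h' hpref'

theorem pv_dedent_filter (s : List Char) (hs : pvTextOk s) (M : List Char)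
    (hMws : ∀ c ∈ M, pvWs c = true)
    (hMpref : ∀ l ∈ (pvSplitNl s).filter pvNB, M <+: l.takeWhile pvWs) :
    (PySem.Chars.splitlines (PySem.Chars.join ['\n']
       (if M = [] then (pvSplitNl s).map pvBlankSub
        else ((pvSplitNl s).map pvBlankSub).map
          (fun l => if M.isPrefixOf l then l.drop M.length else l)))).filter pvNB
      = ((pvSplitNl s).filter pvNB).map (fun l => l.drop M.length) := by
  have hLok : ∀ l ∈ pvSplitNl s, pvLineOk l := by
    intro l hl c hc
    have h2 := pv_mem_pvSplitNl hl hc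
    obtain ⟨hd, hr⟩ := hs c h2.1
    exact ⟨hd, hr, h2.2⟩
  set L2 : List (List Char) :=
    if M = [] then (pvSplitNl s).map pvBlankSub
    else ((pvSplitNl s).map pvBlankSub).map
      (fun l => if M.isPrefixOf l then l.drop M.length else l) with hL2
  have hL2ok : ∀ l ∈ L2, pvLineOk l := by
    intro l hl c hc
    have hsub : ∀ x ∈ (pvSplitNl s).map pvBlankSub, pvLineOk x := by
      intro x hx
      rcases List.mem_map.mp hx with ⟨y, hy, rfl⟩
      intro d hd
      apply hLok y hy d
      unfold pvBlankSub at hd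
      split at hd
      · simp at hd
      · exact hd
    rw [hL2] at hl
    split at hl
    · exact hsub l hl c hc
    · rcases List.mem_map.mp hl with ⟨y, hy, rfl⟩
      have hyok := hsub y hy
      split at hc
      · exact hyok c ((List.drop_sublist _ _).mem hc)
      · exact hyok c hc
  have hL2ne : L2 ≠ [] := by
    rw [hL2]
    split
    · simpa using pvSplitNl_ne_nil s
    · simpa using pvSplitNl_ne_nil s
  have hL2noNl : ∀ l ∈ L2, '\n' ∉ l := fun l hl hc => (hL2ok l hl '\n' hc).2.2 rfl
  have hjoinOk : pvTextOk (PySem.Chars.join ['\n'] L2) := by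
    intro c hc
    rcases pv_mem_join L2 hc with rfl | ⟨l, hl, hcl⟩
    · exact ⟨by decide, by decide⟩
    · exact ⟨(hL2ok l hl c hcl).1, (hL2ok l hl c hcl).2.1⟩
  rw [pv_splitlines_filter _ hjoinOk, pvSplitNl_join L2 hL2ne hL2noNl, hL2]
  split
  · rename_i hM
    rw [pv_blankSub_filter _ hLok]
    subst hM
    simp
  · rename_i hM
    exact pv_rm_filter _ M hM hLok hMws hMpref

theorem pv_main : ∀ (text : String), Dom_extract_common_indentation text → Pre_extract_common_indentation text → extract_common_indentation text = extract_common_indentation_alt text := by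
  intro text hD hP
  have hs : pvTextOk text.toList := by
    intro c hc
    unfold Dom_extract_common_indentation pvDomStr at hD
    exact ⟨List.all_eq_true.mp hD c hc, fun he => hP (he ▸ hc)⟩
  have hlinesOk : ∀ l ∈ pvSplitNl text.toList, pvLineOk l := by
    intro l hl c hc
    have h2 := pv_mem_pvSplitNl hl hc
    obtain ⟨hd, hr⟩ := hs c h2.1
    exact ⟨hd, hr, h2.2⟩
  have hfun : (fun l => decide (PySem.Chars.strip l ≠ [])) = pvNB := by
    funext l; rfl
  have hSL : (PySem.Chars.splitlines text.toList).filter pvNB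
      = (pvSplitNl text.toList).filter pvNB := pv_splitlines_filter _ hs
  simp only [extract_common_indentation, extract_common_indentation_alt]
  rw [PySem.List.foldl_append_ite (p := fun line => PySem.Chars.strip line ≠ [])
      (f := fun line => List.takeWhile pvWs line)]
  rw [List.nil_append, hfun, hSL]
  rcases hfc : (pvSplitNl text.toList).filter pvNB with _ | ⟨f, cf⟩
  · simp
  · rw [List.map_cons, if_neg (List.cons_ne_nil f cf)]
    simp only [List.headD_cons]
    simp only [pvDedent]
    rw [pv_indents_eq _ hlinesOk, hfc, List.map_cons, List.foldl_cons,
      show pvMarginStep none (List.takeWhile pvWs f) = some (List.takeWhile pvWs f) from rfl,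
      pv_foldl_some, Option.getD_some]
    set M : List Char :=
      List.foldl pvLcp (List.takeWhile pvWs f) (List.map (fun l => List.takeWhile pvWs l) cf)
      with hMdef
    have hMpref : ∀ l ∈ (pvSplitNl text.toList).filter pvNB, M <+: l.takeWhile pvWs := by
      intro l hl
      rw [hfc] at hl
      have hmem : List.takeWhile pvWs l
          ∈ (List.takeWhile pvWs f) :: List.map (fun l => List.takeWhile pvWs l) cf := by
        rcases List.mem_cons.mp hl with rfl | h2
        · exact List.mem_cons_self
        · exact List.mem_cons_of_mem _ (List.mem_map.mpr ⟨l, h2, rfl⟩)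
      exact pv_foldl_lcp_prefix _ _ _ hmem
    have hMws : ∀ c ∈ M, pvWs c = true := by
      intro c hc
      have h1 : M <+: List.takeWhile pvWs f := hMpref f (by rw [hfc]; exact List.mem_cons_self)
      exact List.mem_takeWhile_imp (h1.subset hc)
    rw [pv_dedent_filter text.toList hs M hMws hMpref, hfc, List.map_cons, List.headD_cons]
    have hMf : M <+: f :=
      (hMpref f (by rw [hfc]; exact List.mem_cons_self)).trans (List.takeWhile_prefix _)
    have hMle : M.length ≤ f.length := hMf.length_le
    rw [List.length_drop]
    rw [show (↑f.length - ↑(f.length - M.length) : Int) = ((M.length : Nat) : Int) by omega]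
    rw [PySem.List.slice_to_natCast]
    obtain ⟨t, ht⟩ := hMf
    rw [← ht, List.take_left]

-- ===== VERDICT (by name: the statement is the Claim_ definition above) =====
theorem extract_common_indentation_spec : Claim_equal_extract_common_indentation := by
  intro text hD hP
  unfold Spec_extract_common_indentation
  exact pv_main text hD hP
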